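-- pv_equiv track=rewrite | github.com/theCodePy/CTF | ctflearn/programming/ChristmasTreeHash/CTH_hash.py | cth_step1
-- ===== SOURCE A (Python) =====
-- def cth_step1(tree_input: str):
--     # parse input into list of lists of ints, ignore empty lines
--     lines = [list(map(int, line.split())) for line in tree_input.strip().splitlines() if line.strip()]
--     roots = lines[0]
--     branches = lines[1:]
--
--     def traverse(prefix, depth):
--         products = []
--         if depth >= len(branches):
--             return products
--         for val in branches[depth]:
--             new = prefix * val
--             products.append(new)                # include this parent->child product
--             # recurse to include deeper products along this path
--             products.extend(traverse(new, depth + 1))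
--         return products
--
--     all_products = []
--     for root in roots:
--         products = []
--         products.append(root)               # include the root itself
--         products.extend(traverse(root, 0))  # include products for all paths under this root
--         all_products.append(products)
--     return all_products
-- ===== SOURCE B (Python) =====
-- def cth_step1(tree_input: str):
--     # parse input into list of lists of ints, ignore empty lines
--     lines = [list(map(int, line.split())) for line in tree_input.strip().splitlines() if line.strip()]
--     roots = lines[0]
--     branches = lines[1:]
--
--     all_products = []
--     for root in roots:
--         products = []
--         stack = [(root, 0)]
--         while stack:
--             v, d = stack.pop()
--             products.append(v)
--             if d < len(branches):
--                 # push siblings reversed so LIFO pops them left-to-right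
--                 for val in reversed(branches[d]):
--                     stack.append((v * val, d + 1))
--         all_products.append(products)
--     return all_products
-- ===== Notes on version B (the rewrite author's own statement) =====
-- stated objective: alternative
-- what changed: Replaced the recursive traverse over branch levels with an iterative pre-order DFS using an explicit stack of (value, depth) frames, pushing siblings reversed so popping yields them left-to-right.
import Mathlib
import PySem

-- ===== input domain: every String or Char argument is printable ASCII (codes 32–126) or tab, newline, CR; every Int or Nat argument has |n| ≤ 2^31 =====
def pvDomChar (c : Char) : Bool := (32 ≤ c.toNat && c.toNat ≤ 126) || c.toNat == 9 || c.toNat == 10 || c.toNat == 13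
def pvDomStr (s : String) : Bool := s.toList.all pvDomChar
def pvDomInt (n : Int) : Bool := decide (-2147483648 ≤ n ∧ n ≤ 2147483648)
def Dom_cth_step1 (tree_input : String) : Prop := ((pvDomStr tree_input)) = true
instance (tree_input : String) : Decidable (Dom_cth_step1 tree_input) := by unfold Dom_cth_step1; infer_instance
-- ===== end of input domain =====

-- B replaces the recursive traversal by an explicit-stack iterative DFS (same pre-order output); objective: alternative decomposition.

-- shared parsing helper: the identical first line of both Pythons
-- ('[list(map(int, line.split())) for line in tree_input.strip().splitlines() if line.strip()]');
-- exact on Pre_ inputs, where every token parses (getD 0 is never hit there)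
def pvNonblank (s : String) : List String :=
  (PySem.Str.splitlines (PySem.Str.strip s)).filter (fun l => PySem.Str.strip l != "")

def pvParse (s : String) : List (List Int) :=
  (pvNonblank s).map (fun l => (PySem.Str.split₀ l).map (fun t => (PySem.Int.ofStr? t).getD 0))

-- ===== PORT A =====
-- 'def traverse(prefix, depth)': products accumulated by append/extend, recursion into each child
def traverseA (branches : List (List Int)) (pref : Int) (depth : Nat) : List Int :=
  if h : branches.length ≤ depth then []
  else
    (branches[depth]'(Nat.lt_of_not_le h)).foldl
      (fun acc val => acc ++ ((pref * val) :: traverseA branches (pref * val) (depth + 1))) []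
termination_by branches.length - depth
decreasing_by exact Nat.sub_succ_lt_self _ _ (Nat.lt_of_not_le h)

def cth_step1 (tree_input : String) : List (List Int) :=
  match pvParse tree_input with
  | [] => []   -- Python raises IndexError here (lines[0]); excluded by Pre_
  | roots :: branches =>
      roots.foldl (fun acc root => acc ++ [root :: traverseA branches root 0]) []

-- ===== PORT B =====
-- number of nodes of the subtree hanging below a value at the given remaining branch levels;
-- used only to hand the stack loop enough fuel (the loop runs exactly this many iterations)
def pvSize : List (List Int) → Nat
  | [] => 1
  | level :: deeper => 1 + level.length * pvSize deeper

-- the 'while stack:' loop of Source B; list head = top of stack; Python pushes the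
-- children reversed and pops from the end, which is exactly 'children ++ rest';
-- the fuel argument only makes the loop total and is never exhausted when called below
def dfsB (branches : List (List Int)) : Nat → List (Int × Nat) → List Int
  | _, [] => []
  | 0, _ :: _ => []
  | n + 1, (v, d) :: rest =>
      let children : List (Int × Nat) :=
        if h : d < branches.length then
          (branches[d]'h).map (fun val => (v * val, d + 1))
        else []
      v :: dfsB branches n (children ++ rest)

def cth_step1_alt (tree_input : String) : List (List Int) :=
  match pvParse tree_input with
  | [] => []
  | roots :: branches =>
      roots.foldl (fun acc root => acc ++ [dfsB branches (pvSize branches) [(root, 0)]]) []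

-- ===== PRECONDITION & SPEC =====
-- Pre_ excludes exactly the inputs where Python A raises: no nonblank line (IndexError on
-- lines[0]) or a whitespace-separated token that is not an int literal (ValueError in int()).
def Pre_cth_step1 (tree_input : String) : Prop :=
  pvNonblank tree_input ≠ [] ∧
  ∀ l ∈ pvNonblank tree_input, ∀ t ∈ PySem.Str.split₀ l, (PySem.Int.ofStr? t).isSome
instance (tree_input : String) : Decidable (Pre_cth_step1 tree_input) := by
  unfold Pre_cth_step1; infer_instance

def pvWitness_cth_step1 : String := "2 3\n4 5\n6"

def Spec_cth_step1 (tree_input : String) (out : List (List Int)) : Prop := out = cth_step1_alt tree_input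
instance (tree_input : String) (out : List (List Int)) : Decidable (Spec_cth_step1 tree_input out) := by unfold Spec_cth_step1; infer_instance

-- ===== CLAIM (what is proved, stated in full; the proofs are below) =====
def Claim_equal_cth_step1 : Prop := ∀ (tree_input : String), Dom_cth_step1 tree_input → Pre_cth_step1 tree_input → Spec_cth_step1 tree_input (cth_step1 tree_input)

-- ===== LEMMAS AND PROOFS =====

theorem pvSize_pos (branches : List (List Int)) : 0 < pvSize branches := by
  cases branches <;> simp [pvSize]

-- the stack's total remaining work, the quantity the fuel must dominate
def pvMeasure (branches : List (List Int)) (stack : List (Int × Nat)) : Nat :=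
  (stack.map (fun f => pvSize (branches.drop f.2))).sum

theorem traverseA_flatMap (branches : List (List Int)) (pref : Int) (depth : Nat)
    (h : depth < branches.length) :
    traverseA branches pref depth =
      (branches[depth]'h).flatMap
        (fun val => (pref * val) :: traverseA branches (pref * val) (depth + 1)) := by
  rw [traverseA, dif_neg (by omega)]
  exact PySem.List.foldl_append_eq_flatMap _ _ _

theorem dfsB_eq_flatMap (branches : List (List Int)) (n : Nat) (stack : List (Int × Nat))
    (hn : pvMeasure branches stack ≤ n) :
    dfsB branches n stack =
      stack.flatMap (fun f => f.1 :: traverseA branches f.1 f.2) := by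
  induction n generalizing stack with
  | zero =>
      cases stack with
      | nil => rfl
      | cons f rest =>
          exfalso
          have hp := pvSize_pos (branches.drop f.2)
          simp [pvMeasure, List.map_cons, List.sum_cons] at hn
          omega
  | succ n ih =>
      cases stack with
      | nil => rfl
      | cons f rest =>
          obtain ⟨v, d⟩ := f
          rw [dfsB]
          simp only [List.flatMap_cons, List.cons_append, List.cons.injEq, true_and]
          by_cases h : d < branches.length
          · have hdrop : branches.drop d = (branches[d]'h) :: branches.drop (d + 1) :=
              List.drop_eq_getElem_cons h
            have hsz : pvSize (branches.drop d)
                = 1 + (branches[d]'h).length * pvSize (branches.drop (d + 1)) := by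
              rw [hdrop]; rfl
            have hm : pvMeasure branches
                ((branches[d]'h).map (fun val => (v * val, d + 1)) ++ rest) ≤ n := by
              simp only [pvMeasure, List.map_cons, List.sum_cons] at hn
              simp only [pvMeasure, List.map_append, List.sum_append, List.map_map,
                Function.comp_def]
              rw [List.map_const', List.sum_replicate, smul_eq_mul]
              omega
            rw [dif_pos h, ih _ hm]
            simp only [List.flatMap_append, List.flatMap_map]
            rw [traverseA_flatMap branches v d h]
          · rw [dif_neg h, traverseA, dif_pos (Nat.le_of_not_lt h)]
            have hm : pvMeasure branches ([] ++ rest) ≤ n := by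
              have hp := pvSize_pos (branches.drop d)
              simp only [pvMeasure, List.map_cons, List.sum_cons] at hn
              simp only [pvMeasure, List.nil_append]
              omega
            simpa using ih _ hm

-- ===== VERDICT (by name: the statement is the Claim_ definition above) =====
theorem cth_step1_spec : Claim_equal_cth_step1 := by
  intro s _ _
  unfold Spec_cth_step1 cth_step1 cth_step1_alt
  cases pvParse s with
  | nil => rfl
  | cons roots branches =>
      simp only [PySem.List.foldl_append_singleton_eq_map, List.nil_append]
      refine List.map_congr_left (fun root _ => ?_)
      rw [dfsB_eq_flatMap branches (pvSize branches) [(root, 0)] (by simp [pvMeasure])]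
      simp
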